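-- pv_equiv track=rewrite | github.com/mount2/text_analysis_demo | processing3.py | check_duplication_in_list
-- ===== SOURCE A (Python) =====
-- def check_duplication_in_list(word_list,length):
--     # find duplication in a list and return a dictionary of the duplicated words and
--     # their positions
--     repeted_word = {}
--     for i in range(len(word_list)-length):
--         if word_list[i] == word_list[i+length]:
--             if word_list[i] in repeted_word.keys():
--                 repeted_word[word_list[i]].append(i)
--             else:
--                 repeted_word[word_list[i]]= [i]
--
--     return repeted_word
-- ===== SOURCE B (Python) =====
-- def check_duplication_in_list(word_list, length):
--     # Build a positional index word -> all positions once, then take, per word,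
--     # the positions whose gap-partner is also a position of that word; order the
--     # per-word groups by their first recorded position (A's insertion order).
--     index = {}
--     for pos, word in enumerate(word_list):
--         index.setdefault(word, []).append(pos)
--     groups = []
--     for word, positions in index.items():
--         pset = set(positions)
--         hits = [p for p in positions if p + length in pset]
--         if hits:
--             groups.append((word, hits))
--     groups.sort(key=lambda g: g[1][0])
--     return dict(groups)
-- ===== Notes on version B (the rewrite author's own statement) =====
-- stated objective: alternative
-- what changed: Instead of scanning index pairs (i, i+length) directly into the result dict, B builds a word-to-positions index in one pass, selects per word the positions whose gap-partner is also a position of that word, and restores A's insertion order with a stable sort on each group's first recorded position.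
import Mathlib
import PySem

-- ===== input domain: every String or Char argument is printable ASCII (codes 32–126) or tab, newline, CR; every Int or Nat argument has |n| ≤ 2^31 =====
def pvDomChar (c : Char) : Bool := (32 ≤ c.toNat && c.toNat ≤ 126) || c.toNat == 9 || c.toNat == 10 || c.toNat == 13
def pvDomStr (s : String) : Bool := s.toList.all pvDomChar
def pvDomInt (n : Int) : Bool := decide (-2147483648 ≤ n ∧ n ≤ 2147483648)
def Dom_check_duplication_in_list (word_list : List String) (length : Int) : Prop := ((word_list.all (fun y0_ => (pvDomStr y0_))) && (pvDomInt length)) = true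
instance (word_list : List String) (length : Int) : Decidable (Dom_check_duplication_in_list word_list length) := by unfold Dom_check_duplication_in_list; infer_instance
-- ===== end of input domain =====

-- B replaces A's single gap-scan by a word→positions index built in one pass, per-word
-- partner filtering, and a stable sort by first hit to restore A's insertion order
-- (objective: alternative decomposition, same asymptotic cost).


-- ===== PORT A =====
-- Literal port of A's loop: for i in range(len(word_list)-length): if wl[i]==wl[i+length]: append i.
-- wl[i] is pyGetD with default "": exact under Pre_ (0 ≤ length keeps both indices in range for every
-- executed i); for length < 0 Python raises IndexError and those inputs are outside Pre_.
def check_duplication_in_list (word_list : List String) (length : Int) : List (String × List Int) :=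
  let repeted_word : PySem.Dict String (List Int) :=
    (PySem.List.pyRange 0 ((word_list.length : Int) - length)).foldl
      (fun d i =>
        if PySem.List.pyGetD word_list i "" == PySem.List.pyGetD word_list (i + length) "" then
          match d.get? (PySem.List.pyGetD word_list i "") with
          | some l => d.insert (PySem.List.pyGetD word_list i "") (l ++ [i])
          | none   => d.insert (PySem.List.pyGetD word_list i "") [i]
        else d)
      PySem.Dict.empty
  repeted_word.items

-- ===== PORT B =====
-- Literal port of Source B: positional index (setdefault/append = modify with default []),
-- per-word partner filter against the set of its positions, groups appended when non-empty
-- (Python truthiness 'if hits:'), stable sort by first hit, then dict(groups).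
def check_duplication_in_list_alt (word_list : List String) (length : Int) : List (String × List Int) :=
  let index : PySem.Dict String (List Int) :=
    (PySem.List.enumerate word_list).foldl
      (fun d pw => d.modify pw.2 [] (· ++ [pw.1]))
      PySem.Dict.empty
  let groups : List (String × List Int) :=
    index.items.foldl
      (fun acc g =>
        let pset := PySem.Set.ofList g.2
        let hits := g.2.filter (fun p => PySem.Set.contains pset (p + length))
        if hits.isEmpty then acc else acc ++ [(g.1, hits)])
      []
  let sortedGroups := PySem.List.sorted groups (fun g => PySem.List.pyGetD g.2 0 0)
  (PySem.Dict.ofList sortedGroups).items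

-- ===== PRECONDITION & SPEC =====
-- Pre_ excludes exactly length < 0, where Python A always raises IndexError
-- (the loop bound len(word_list)-length then exceeds len(word_list)).
def Pre_check_duplication_in_list (word_list : List String) (length : Int) : Prop := 0 ≤ length
instance (word_list : List String) (length : Int) : Decidable (Pre_check_duplication_in_list word_list length) := by unfold Pre_check_duplication_in_list; infer_instance
def pvWitness_check_duplication_in_list : List String × Int := (["a", "b", "a", "b", "a"], 2)

def Spec_check_duplication_in_list (word_list : List String) (length : Int) (out : List (String × List Int)) : Prop := out = check_duplication_in_list_alt word_list length
instance (word_list : List String) (length : Int) (out : List (String × List Int)) : Decidable (Spec_check_duplication_in_list word_list length out) := by unfold Spec_check_duplication_in_list; infer_instance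

-- ===== CLAIM (what is proved, stated in full; the proofs are below) =====
def Claim_equal_check_duplication_in_list : Prop := ∀ (word_list : List String) (length : Int), Dom_check_duplication_in_list word_list length → Pre_check_duplication_in_list word_list length → Spec_check_duplication_in_list word_list length (check_duplication_in_list word_list length)

-- ===== LEMMAS AND PROOFS =====

-- the word at Nat position i (wl[i], total form; the "" default is never observed where used)
def pvWord (wl : List String) (i : Nat) : String := wl.getD i ""
-- the Nat match positions of A's loop (gap L = length.toNat)
def pvM (wl : List String) (L : Nat) : List Nat :=
  (List.range (wl.length - L)).filter (fun i => pvWord wl i == pvWord wl (i + L))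
-- the recorded positions of word k
def pvVal (wl : List String) (L : Nat) (k : String) : List Int :=
  List.map (fun i : Nat => (i : Int)) ((pvM wl L).filter (fun i => pvWord wl i == k))
-- the result keys, in order of first match
def pvKeys (wl : List String) (L : Nat) : List String :=
  PySem.Set.ofList ((pvM wl L).map (fun i => pvWord wl i))
-- the canonical result both programs compute
def pvItems (wl : List String) (L : Nat) : List (String × List Int) :=
  (pvKeys wl L).map (fun k => (k, pvVal wl L k))
-- all positions of word k in wl, as Ints, increasing
def pvPos (wl : List String) (k : String) : List Int :=
  List.map (fun i : Nat => (i : Int)) ((List.range wl.length).filter (fun i => pvWord wl i == k))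

lemma pv_pyRange_zero_eq (z : Int) :
    PySem.List.pyRange 0 z = List.map (fun k : Nat => (k : Int)) (List.range z.toNat) := by
  by_cases hz : z ≤ 0
  · have h1 : PySem.List.pyRange 0 z = [] := by
      rw [List.eq_nil_iff_forall_not_mem]
      intro x hx
      rw [PySem.List.mem_pyRange_one] at hx
      omega
    rw [h1, Int.toNat_of_nonpos hz]
    simp
  · rw [show z = (z.toNat : Int) from (Int.toNat_of_nonneg (by omega)).symm,
        PySem.List.pyRange_zero_natCast]
    simp only [Int.toNat_natCast]

lemma pv_match_modify (d : PySem.Dict String (List Int)) (w : String) (i : Int) :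
    (match d.get? w with
      | some l => d.insert w (l ++ [i])
      | none   => d.insert w [i]) = d.modify w [] (· ++ [i]) := by
  cases hg : d.get? w <;>
    simp [PySem.Dict.modify, PySem.Dict.getD_eq_get?_getD, hg]


def pvHits (length : Int) (ps : List Int) : List Int :=
  ps.filter (fun p => PySem.Set.contains (PySem.Set.ofList ps) (p + length))

lemma pv_range_restrict (n L : Nat) (q : Nat → Bool) :
    (List.range n).filter (fun i => decide (i + L < n) && q i)
      = (List.range (n - L)).filter q := by
  by_cases hLn : L ≤ n
  · have hn : n = (n - L) + L := by omega
    rw [hn, List.range_add, List.filter_append]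
    have h1 : (List.range (n - L)).filter (fun i => decide (i + L < n - L + L) && q i)
        = (List.range (n - L)).filter q := by
      apply List.filter_congr
      intro i hi
      rw [List.mem_range] at hi
      simp [show i + L < n - L + L by omega]
    have h2 : (List.map (fun x => n - L + x) (List.range L)).filter
        (fun i => decide (i + L < n - L + L) && q i) = [] := by
      rw [List.filter_eq_nil_iff]
      intro a ha
      rcases List.mem_map.mp ha with ⟨j, _, rfl⟩
      have hno : ¬ (n - L + j + L < n - L + L) := by omega
      simp [hno]
    rw [h1, h2, List.append_nil]
    have h3 : n - L + L - L = n - L := by omega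
    rw [h3]
  · have h0 : n - L = 0 := by omega
    rw [h0]
    simp only [List.range_zero, List.filter_nil]
    rw [List.filter_eq_nil_iff]
    intro a ha
    rw [List.mem_range] at ha
    have hno : ¬ (a + L < n) := by omega
    simp [hno]

lemma pv_mem_pos (wl : List String) (k : String) (z : Int) :
    z ∈ pvPos wl k ↔ ∃ j : Nat, j < wl.length ∧ pvWord wl j = k ∧ (j : Int) = z := by
  unfold pvPos
  simp only [List.mem_map, List.mem_filter, List.mem_range, beq_iff_eq]
  constructor
  · rintro ⟨j, ⟨hj, hw⟩, rfl⟩; exact ⟨j, hj, hw, rfl⟩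
  · rintro ⟨j, hj, hw, rfl⟩; exact ⟨j, ⟨hj, hw⟩, rfl⟩

lemma pv_mem_pos_add (wl : List String) (k : String) (L : Nat) (i : Nat) :
    ((i : Int) + (L : Int)) ∈ pvPos wl k ↔ (i + L < wl.length ∧ pvWord wl (i + L) = k) := by
  rw [pv_mem_pos]
  constructor
  · rintro ⟨j, hj, hw, hc⟩
    have : j = i + L := by omega
    subst this
    exact ⟨hj, hw⟩
  · rintro ⟨hj, hw⟩
    exact ⟨i + L, hj, hw, by push_cast; ring⟩

lemma pv_hits_eq (wl : List String) (L : Nat) (k : String) :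
    pvHits (L : Int) (pvPos wl k) = pvVal wl L k := by
  have expand : pvHits (L : Int) (pvPos wl k)
      = List.map (fun i : Nat => (i : Int))
          (((List.range wl.length).filter (fun i => pvWord wl i == k)).filter
            (fun i => PySem.Set.contains (PySem.Set.ofList (pvPos wl k)) ((i : Int) + (L : Int)))) := by
    unfold pvHits
    conv_lhs => rw [show pvPos wl k = List.map (fun i : Nat => (i : Int))
      ((List.range wl.length).filter (fun i => pvWord wl i == k)) from rfl]
    rw [List.filter_map]
    rfl
  rw [expand]
  unfold pvVal pvM
  congr 1
  rw [List.filter_filter, List.filter_filter]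
  have hmid : (List.range wl.length).filter
        (fun a : Nat => PySem.Set.contains (PySem.Set.ofList (pvPos wl k)) ((a : Int) + (L : Int)) && (pvWord wl a == k))
      = (List.range wl.length).filter
        (fun i => decide (i + L < wl.length) && ((pvWord wl i == k) && (pvWord wl i == pvWord wl (i + L)))) := by
    apply List.filter_congr
    intro i hi
    rw [List.mem_range] at hi
    have hk := pv_mem_pos_add wl k L i
    by_cases h1 : pvWord wl i = k
    · by_cases h2 : i + L < wl.length
      · by_cases h3 : pvWord wl (i + L) = k
        · simp [PySem.Set.contains, PySem.Set.mem_ofList, hk, h1, h2, h3]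
        · simp [PySem.Set.contains, PySem.Set.mem_ofList, hk, h1, h2, h3]
          exact fun he => h3 he.symm
      · simp [PySem.Set.contains, PySem.Set.mem_ofList, hk, h1, h2]
    · simp [PySem.Set.contains, beq_eq_decide, h1]
  rw [hmid, pv_range_restrict]

lemma pv_headD_mem {l : List Nat} (h : l ≠ []) : l.headD 0 ∈ l := by
  cases l with
  | nil => exact absurd rfl h
  | cons x t => exact List.mem_cons_self

lemma pv_filter_ne_nil_of_mem {α : Type} [BEq α] [LawfulBEq α] {ys : List Nat} {f : Nat → α} {a : α}
    (ha : a ∈ ys.map f) : ys.filter (fun i => f i == a) ≠ [] := by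
  rcases List.mem_map.mp ha with ⟨i, hi, rfl⟩
  intro hnil
  have : i ∈ ys.filter (fun i' => f i' == f i) := List.mem_filter.mpr ⟨hi, by simp⟩
  rw [hnil] at this
  exact absurd this (List.not_mem_nil)

lemma pv_first_pairwise (xs : List Nat) (f : Nat → String) (hx : xs.Pairwise (· < ·)) :
    (PySem.Set.ofList (xs.map f)).Pairwise (fun a b =>
      (xs.filter (fun i => f i == a)).headD 0 < (xs.filter (fun i => f i == b)).headD 0) := by
  induction xs using List.reverseRecOn with
  | nil => simp [PySem.Set.ofList, PySem.Set.empty]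
  | append_singleton ys y ih =>
    have hys : ys.Pairwise (· < ·) := (List.pairwise_append.mp hx).1
    have hlt : ∀ i ∈ ys, i < y := by
      intro i hi
      exact (List.pairwise_append.mp hx).2.2 i hi y List.mem_cons_self
    have ihp := ih hys
    have hof : PySem.Set.ofList ((ys ++ [y]).map f)
        = PySem.Set.add (PySem.Set.ofList (ys.map f)) (f y) := by
      simp [PySem.Set.ofList, List.foldl_append]
    have hhead : ∀ a ∈ PySem.Set.ofList (ys.map f),
        ((ys ++ [y]).filter (fun i => f i == a)).headD 0 = (ys.filter (fun i => f i == a)).headD 0 := by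
      intro a ha
      have ha' : a ∈ ys.map f := (PySem.Set.mem_ofList _ _).mp ha
      have hne := pv_filter_ne_nil_of_mem ha'
      rw [List.filter_append]
      cases hc : ys.filter (fun i => f i == a) with
      | nil => exact absurd hc hne
      | cons x t => simp
    rw [hof]
    unfold PySem.Set.add
    by_cases hc : (PySem.Set.ofList (ys.map f)).contains (f y) = true
    · rw [if_pos hc]
      refine List.Pairwise.imp_of_mem ?_ ihp
      intro a b ha hb hab
      rw [hhead a ha, hhead b hb]
      exact hab
    · rw [if_neg hc]
      rw [List.pairwise_append]
      refine ⟨List.Pairwise.imp_of_mem ?_ ihp, List.pairwise_singleton _ _, ?_⟩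
      · intro a b ha hb hab
        rw [hhead a ha, hhead b hb]
        exact hab
      · intro a ha b hb
        rw [List.mem_singleton] at hb
        subst hb
        rw [hhead a ha]
        have hfy : f y ∉ ys.map f := by
          intro hmem
          exact hc (by
            have := (PySem.Set.mem_ofList (ys.map f) (f y)).mpr hmem
            simpa [PySem.Set.contains, List.contains_iff_mem] using this)
        have hfilnil : ys.filter (fun i => f i == f y) = [] := by
          rw [List.filter_eq_nil_iff]
          intro i hi hbe
          exact hfy (List.mem_map.mpr ⟨i, hi, by simpa using hbe⟩)
        have hnew : ((ys ++ [y]).filter (fun i => f i == f y)).headD 0 = y := by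
          rw [List.filter_append, hfilnil]
          simp
        rw [hnew]
        have ha' : a ∈ ys.map f := (PySem.Set.mem_ofList _ _).mp ha
        have hne := pv_filter_ne_nil_of_mem ha'
        have hmem := pv_headD_mem hne
        have : (ys.filter (fun i => f i == a)).headD 0 ∈ ys := (List.mem_filter.mp hmem).1
        exact hlt _ this

lemma pv_index_items (wl : List String) :
    ((PySem.List.enumerate wl).foldl
        (fun (d : PySem.Dict String (List Int)) pw => d.modify pw.2 [] (· ++ [pw.1]))
        PySem.Dict.empty).items
      = (PySem.Set.ofList wl).map (fun k => (k, pvPos wl k)) := by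
  have hQ : (PySem.List.enumerate wl).foldl
        (fun (d : PySem.Dict String (List Int)) pw => d.modify pw.2 [] (· ++ [pw.1]))
        PySem.Dict.empty
      = List.foldl (fun d p => d.modify p.1 [] (· ++ [p.2])) PySem.Dict.empty
        ((PySem.List.enumerate wl).map (fun pw => (pw.2, pw.1))) := by
    rw [List.foldl_map]
  rw [hQ]
  have hnodup : (List.foldl (fun (d : PySem.Dict String (List Int)) p => d.modify p.1 [] (· ++ [p.2])) PySem.Dict.empty
      ((PySem.List.enumerate wl).map (fun pw => (pw.2, pw.1)))).keys.Nodup :=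
    PySem.Dict.nodup_keys_foldl_modify_key _ Prod.fst [] (fun _ p => (· ++ [p.2])) _ (by simp)
  rw [PySem.Dict.items_eq_map_keys _ hnodup []]
  have hkeys : (List.foldl (fun (d : PySem.Dict String (List Int)) p => d.modify p.1 [] (· ++ [p.2])) PySem.Dict.empty
      ((PySem.List.enumerate wl).map (fun pw => (pw.2, pw.1)))).keys = PySem.Set.ofList wl := by
    rw [show (fun (d : PySem.Dict String (List Int)) (p : String × Int) => d.modify p.1 [] (· ++ [p.2]))
        = fun d p => d.modify (Prod.fst p) [] ((fun (_ : PySem.Dict String (List Int)) (p : String × Int) => (· ++ [p.2])) d p) from rfl,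
      PySem.Dict.keys_foldl_modify_key]
    rw [List.map_map]
    rw [show ((Prod.fst ∘ fun pw : Int × String => (pw.2, pw.1))) = fun pw : Int × String => pw.2 from rfl]
    rw [PySem.List.map_snd_enumerate wl 0]
    rfl
  rw [hkeys]
  apply List.map_congr_left
  intro k hk
  rw [PySem.Dict.getD_foldl_modify_append]
  simp only [PySem.Dict.getD_empty, List.nil_append, List.filter_map, List.map_map]
  congr 1
  rw [PySem.List.enumerate_eq_map_pyRange wl ""]
  rw [show PySem.List.len wl = (wl.length : Int) from rfl]
  rw [pv_pyRange_zero_eq]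
  simp only [Int.toNat_natCast, List.filter_map, List.map_map]
  unfold pvPos
  apply congrArg₂
  · rfl
  · apply List.filter_congr
    intro i hi
    rw [List.mem_range] at hi
    simp [Function.comp_def, PySem.List.pyGetD_natCast, pvWord]
lemma pv_A_eq (wl : List String) (length : Int) (h : 0 ≤ length) :
    check_duplication_in_list wl length = pvItems wl length.toNat := by
  set L := length.toNat with hL
  have hlen : length = (L : Int) := by omega
  unfold check_duplication_in_list
  rw [pv_pyRange_zero_eq]
  have h1 : ((wl.length : Int) - length).toNat = wl.length - L := by omega
  rw [h1, List.foldl_map]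
  have hbody : (fun (d : PySem.Dict String (List Int)) (i : Nat) =>
      if PySem.List.pyGetD wl (i : Int) "" == PySem.List.pyGetD wl ((i : Int) + length) "" then
        match d.get? (PySem.List.pyGetD wl (i : Int) "") with
        | some l => d.insert (PySem.List.pyGetD wl (i : Int) "") (l ++ [(i : Int)])
        | none   => d.insert (PySem.List.pyGetD wl (i : Int) "") [(i : Int)]
      else d)
      = fun d i => if pvWord wl i == pvWord wl (i + L) then d.modify (pvWord wl i) [] (· ++ [(i : Int)]) else d := by
    funext d i
    have hc : (i : Int) + length = ((i + L : Nat) : Int) := by omega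
    rw [hc, PySem.List.pyGetD_natCast, PySem.List.pyGetD_natCast, pv_match_modify]
    rfl
  rw [hbody, ← List.foldl_filter]
  have hP : List.foldl (fun (d : PySem.Dict String (List Int)) (i : Nat) => d.modify (pvWord wl i) [] (· ++ [(i : Int)])) PySem.Dict.empty (pvM wl L)
      = List.foldl (fun d p => d.modify p.1 [] (· ++ [p.2])) PySem.Dict.empty ((pvM wl L).map (fun i => (pvWord wl i, (i : Int)))) := by
    rw [List.foldl_map]
  show (List.foldl (fun (d : PySem.Dict String (List Int)) (i : Nat) => d.modify (pvWord wl i) [] (· ++ [(i : Int)])) PySem.Dict.empty (pvM wl L)).items = _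
  rw [hP]
  have hnodup : (List.foldl (fun (d : PySem.Dict String (List Int)) p => d.modify p.1 [] (· ++ [p.2])) PySem.Dict.empty ((pvM wl L).map (fun i => (pvWord wl i, (i : Int))))).keys.Nodup := by
    exact PySem.Dict.nodup_keys_foldl_modify_key _ Prod.fst [] (fun _ p => (· ++ [p.2])) _ (by simp)
  rw [PySem.Dict.items_eq_map_keys _ hnodup []]
  have hkeys : (List.foldl (fun (d : PySem.Dict String (List Int)) p => d.modify p.1 [] (· ++ [p.2])) PySem.Dict.empty ((pvM wl L).map (fun i => (pvWord wl i, (i : Int))))).keys = pvKeys wl L := by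
    rw [show (fun (d : PySem.Dict String (List Int)) (p : String × Int) => d.modify p.1 [] (· ++ [p.2])) = fun d p => d.modify (Prod.fst p) [] ((fun (_ : PySem.Dict String (List Int)) (p : String × Int) => (· ++ [p.2])) d p) from rfl,
       PySem.Dict.keys_foldl_modify_key]
    simp [pvKeys, PySem.Set.ofList, List.map_map]
    rfl
  rw [hkeys]
  unfold pvItems
  apply List.map_congr_left
  intro k hk
  rw [PySem.Dict.getD_foldl_modify_append]
  simp only [PySem.Dict.getD_empty, List.nil_append, List.filter_map]
  rw [List.map_map]
  unfold pvVal
  simp only [Function.comp_def]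

lemma pv_groups_eq (wl : List String) (L : Nat) :
    (((PySem.Set.ofList wl).map (fun k => (k, pvPos wl k))).foldl
        (fun (acc : List (String × List Int)) g =>
          let pset := PySem.Set.ofList g.2
          let hits := g.2.filter (fun p => PySem.Set.contains pset (p + (L : Int)))
          if hits.isEmpty then acc else acc ++ [(g.1, hits)])
        [])
      = ((PySem.Set.ofList wl).filter (fun k => !(pvVal wl L k).isEmpty)).map
          (fun k => (k, pvVal wl L k)) := by
  have hbody : (fun (acc : List (String × List Int)) (g : String × List Int) =>
        let pset := PySem.Set.ofList g.2
        let hits := g.2.filter (fun p => PySem.Set.contains pset (p + (L : Int)))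
        if hits.isEmpty then acc else acc ++ [(g.1, hits)])
      = fun acc g => if (!(pvHits (L : Int) g.2).isEmpty) = true
          then acc ++ [(g.1, pvHits (L : Int) g.2)] else acc := by
    funext acc g
    show (if (pvHits (L : Int) g.2).isEmpty then acc else acc ++ [(g.1, pvHits (L : Int) g.2)]) = _
    cases (pvHits (L : Int) g.2).isEmpty <;> simp
  rw [hbody, PySem.List.foldl_append_if, List.filter_map, List.map_map]
  simp only [Function.comp_def, pv_hits_eq, List.nil_append]

lemma pv_val_ne_nil_iff (wl : List String) (L : Nat) (k : String) :
    (pvVal wl L k ≠ []) ↔ ∃ i ∈ pvM wl L, pvWord wl i = k := by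
  unfold pvVal
  rw [Ne, List.map_eq_nil_iff]
  constructor
  · intro hne
    rcases List.exists_mem_of_ne_nil _ hne with ⟨i, hi⟩
    rcases List.mem_filter.mp hi with ⟨hiM, hbe⟩
    exact ⟨i, hiM, by simpa using hbe⟩
  · rintro ⟨i, hiM, hw⟩
    intro hnil
    have hmem : i ∈ (pvM wl L).filter (fun i => pvWord wl i == k) :=
      List.mem_filter.mpr ⟨hiM, by simpa using hw⟩
    rw [hnil] at hmem
    exact absurd hmem List.not_mem_nil

lemma pv_mem_wl_of_mem_M (wl : List String) (L : Nat) {i : Nat} (hi : i ∈ pvM wl L) :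
    pvWord wl i ∈ wl := by
  have hilt : i < wl.length - L := List.mem_range.mp (List.mem_filter.mp hi).1
  have h : i < wl.length := by omega
  unfold pvWord
  rw [List.getD_eq_getElem wl "" h]
  exact List.getElem_mem h

lemma pv_perm (wl : List String) (L : Nat) :
    (((PySem.Set.ofList wl).filter (fun k => !(pvVal wl L k).isEmpty)).map
        (fun k => (k, pvVal wl L k))).Perm (pvItems wl L) := by
  unfold pvItems pvKeys
  apply List.Perm.map
  rw [List.perm_ext_iff_of_nodup (List.Nodup.filter _ (PySem.Set.nodup_ofList wl))
    (PySem.Set.nodup_ofList _)]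
  intro k
  rw [List.mem_filter, PySem.Set.mem_ofList, PySem.Set.mem_ofList]
  constructor
  · rintro ⟨hkwl, hne⟩
    have : pvVal wl L k ≠ [] := by simpa using hne
    rcases (pv_val_ne_nil_iff wl L k).mp this with ⟨i, hiM, hw⟩
    exact List.mem_map.mpr ⟨i, hiM, hw⟩
  · intro hk
    rcases List.mem_map.mp hk with ⟨i, hiM, rfl⟩
    refine ⟨pv_mem_wl_of_mem_M wl L hiM, ?_⟩
    have : pvVal wl L (pvWord wl i) ≠ [] := (pv_val_ne_nil_iff wl L _).mpr ⟨i, hiM, rfl⟩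
    simpa using this

lemma pv_pyGetD_zero (l : List Nat) :
    PySem.List.pyGetD (List.map (fun i : Nat => (i : Int)) l) 0 0 = ((l.headD 0 : Nat) : Int) := by
  cases l <;> simp [PySem.List.pyGetD, PySem.List.pyGet?, PySem.List.pyIdx?]

lemma pv_items_pairwise (wl : List String) (L : Nat) :
    (pvItems wl L).Pairwise (fun a b => PySem.List.pyGetD a.2 0 0 < PySem.List.pyGetD b.2 0 0) := by
  unfold pvItems
  rw [List.pairwise_map]
  have hM : (pvM wl L).Pairwise (· < ·) :=
    List.Pairwise.sublist List.filter_sublist List.pairwise_lt_range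
  have hpw := pv_first_pairwise (pvM wl L) (fun i => pvWord wl i) hM
  unfold pvKeys
  refine List.Pairwise.imp ?_ hpw
  intro a b hab
  show PySem.List.pyGetD (pvVal wl L a) 0 0 < PySem.List.pyGetD (pvVal wl L b) 0 0
  unfold pvVal
  rw [pv_pyGetD_zero, pv_pyGetD_zero]
  exact_mod_cast hab

lemma pv_ofList_items (l : List (String × List Int)) (h : (l.map Prod.fst).Nodup) :
    (PySem.Dict.ofList l).items = l := by
  show (List.foldl (fun (acc : PySem.Dict String (List Int)) p => acc.insert p.1 p.2) PySem.Dict.empty l).items = l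
  rw [PySem.Dict.items_foldl_insert_fresh l Prod.fst Prod.snd PySem.Dict.empty
    (fun a _ => PySem.Dict.contains_empty _) h]
  simp [PySem.Dict.empty]

lemma pv_B_eq (wl : List String) (length : Int) (h : 0 ≤ length) :
    check_duplication_in_list_alt wl length = pvItems wl length.toNat := by
  set L := length.toNat with hL
  have hlen : length = (L : Int) := by omega
  have hshow : check_duplication_in_list_alt wl length
      = (PySem.Dict.ofList (PySem.List.sorted
          ((((PySem.List.enumerate wl).foldl
              (fun (d : PySem.Dict String (List Int)) pw => d.modify pw.2 [] (· ++ [pw.1]))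
              PySem.Dict.empty).items).foldl
            (fun (acc : List (String × List Int)) g =>
              let pset := PySem.Set.ofList g.2
              let hits := g.2.filter (fun p => PySem.Set.contains pset (p + length))
              if hits.isEmpty then acc else acc ++ [(g.1, hits)])
            [])
          (fun g => PySem.List.pyGetD g.2 0 0))).items := rfl
  rw [hshow, hlen, pv_index_items wl, pv_groups_eq wl L]
  have hsorted : PySem.List.sorted
        (((PySem.Set.ofList wl).filter (fun k => !(pvVal wl L k).isEmpty)).map
          (fun k => (k, pvVal wl L k)))
        (fun g => PySem.List.pyGetD g.2 0 0)
      = pvItems wl L :=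
    PySem.List.sorted_eq_of_perm_of_pairwise_lt _ _ _
      (pv_perm wl L).symm (pv_items_pairwise wl L)
  rw [hsorted]
  apply pv_ofList_items
  unfold pvItems
  rw [List.map_map]
  rw [show (Prod.fst ∘ fun k => (k, pvVal wl L k)) = id from rfl]
  rw [List.map_id]
  exact PySem.Set.nodup_ofList _

-- ===== VERDICT (by name: the statement is the Claim_ definition above) =====
theorem check_duplication_in_list_spec : Claim_equal_check_duplication_in_list := by
  intro wl length _ hpre
  unfold Spec_check_duplication_in_list
  rw [pv_A_eq wl length hpre, pv_B_eq wl length hpre]
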